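/- GENERATED by tools/from_farm_form.py from prooffarm-gif/accepted/DGifGetLine.3/Proof.lean (a worked proof of the farm's unit `DGifGetLine.3`,
   accepted by the verdict) — do not edit. -/
import Gif.Spec.Units.DGifGetLine_3
import Gif.Spec.AllSegs
import Gif.Spec.Proved.DGifGetLine_3_Lemmas

open X86 X86.User Asan ProgX.Base ProgX.Base.Spec Gif.Spec

/-!
  `DGifGetLine.3` (0x10a2ea … 0x10a30a, 10 instructions; dgif_lib.c:511-518): ONE ROUND OF THE FLUSH LOOP of `DGifGetLine`, a body
  segment of a protected function with a contract call in the middle: `DGifGetCodeNext(gif, &Dummy)`, `Dummy` the object of the own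
  frame. The call's return address 0x10a2f7 (`ret9`) is not a cut of the design, so the unit makes it one of its own: the private
  assertion `gl3_AtRet9` (`Body` + what is live there) and two walks (Lemmas.lean), chained here.
-/

namespace Gif.Spec.DGifGetLine_3
end Gif.Spec.DGifGetLine_3

/-- Segment 3 of `DGifGetLine` takes `Head m` at 0x10a2ea back to `Head m'` with `m' < m`, or to `Done` at 0x10a28e. -/
theorem Gif.Spec.Proved.DGifGetLine_3_ok : Gif.Spec.DGifGetLine_3.Statement := by
  unfold Gif.Spec.DGifGetLine_3.Statement
  intro Lay hLay μ hμ u₀ hcode h_DGifGetCodeNext H rest frames F R n e ret m v hat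
  -- the callee's contract for the frame list of the body (the own frame in front)
  have hgcn := h_DGifGetCodeNext H rest (DGifGetLine.framesIn frames e) F R
  -- 0x10a2ea … the call of DGifGetCodeNext (dgif_lib.c:512) … 0x10a2f7
  refine (Gif.Spec.DGifGetLine_3.gl3_seg_call Lay hLay μ hμ u₀ hcode H rest frames F R n e ret m hgcn v hat).trans ?_
  -- 0x10a2f7 … 0x10a2ea (back edge, dgif_lib.c:516) | 0x10a28e (the epilogue)
  intro v1 hv1
  exact Gif.Spec.DGifGetLine_3.gl3_seg_tail Lay hLay μ hμ u₀ hcode H rest frames F R n e ret m v1 hv1
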